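-- pv_equiv track=rewrite | github.com/atshaya-anand/LeetCode-programs | Medium/makingFileNamesUnique.py | getFolderNames
-- ===== SOURCE A (Python) =====
-- from typing import List
--
-- def getFolderNames(names: List[str]) -> List[str]:
--     res = {}
--     ans = []
--     fileCount = 0
--
--     for key in names:
--         if key not in res:
--                 ans.append(key)
--                 res[key] = 1
--         else:
--             fileCount = res[key]
--             while fileCount:
--                 str_ = key + "(" + str(fileCount) + ")"
--                 if str_ not in res:
--                     ans.append(str_)
--                     res[str_] = 1
--                     fileCount += 1
--                     break
--                 fileCount += 1
--             res[key] = fileCount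
--
--     return ans
-- ===== SOURCE B (Python) =====
-- def getFolderNames(names):
--     taken = set()
--     ans = []
--     for name in names:
--         if name in taken:
--             k = 1
--             while name + "(" + str(k) + ")" in taken:
--                 k += 1
--             name = name + "(" + str(k) + ")"
--         ans.append(name)
--         taken.add(name)
--     return ans
-- ===== Notes on version B (the rewrite author's own statement) =====
-- stated objective: simpler
-- what changed: B drops A's per-name resume-counter dictionary entirely: it keeps only a set of taken names and, on a collision, rescans suffixes from k=1 until a free one is found (valid because taken names are never removed, so the first free suffix is monotone).
import Mathlib
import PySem

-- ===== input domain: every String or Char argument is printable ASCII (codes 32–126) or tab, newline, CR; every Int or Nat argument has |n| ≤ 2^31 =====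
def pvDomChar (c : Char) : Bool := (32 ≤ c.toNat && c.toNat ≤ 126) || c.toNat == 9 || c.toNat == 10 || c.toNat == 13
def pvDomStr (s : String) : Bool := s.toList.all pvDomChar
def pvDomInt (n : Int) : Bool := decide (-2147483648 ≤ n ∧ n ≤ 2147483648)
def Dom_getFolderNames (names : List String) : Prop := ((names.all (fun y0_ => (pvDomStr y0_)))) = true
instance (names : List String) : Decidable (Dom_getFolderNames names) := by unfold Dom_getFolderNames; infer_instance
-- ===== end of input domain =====

-- B drops A's memoized resume-counter dictionary and keeps only a set of taken
-- names, rescanning suffixes from k = 1 on every collision (simpler state, same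
-- output because taken names are never removed).

-- ===== PORT A =====
-- A keeps `res`: every produced name maps to 1, and each colliding base name is
-- overwritten with the counter at which to resume its suffix search.

/-- `key + "(" + str(fc) + ")"` -/
def pvSuff (key : String) (fc : Int) : String :=
  key ++ "(" ++ PySem.Int.toStr fc ++ ")"

/-- A's inner `while fileCount:` loop.  `some fc` = `break` with `str_` built from
    `fc` free (Python then increments and stores `fc + 1`); `none` = the condition
    `fileCount` is 0, i.e. the loop exits without appending.  The fuel only makes
    the recursion structural (returning the current `fc` when exhausted): the loop
    provably reaches a free name within `res.size + 1` probes, see the lemmas. -/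
def pvAWhile (res : PySem.Dict String Int) (key : String) : Int → Nat → Option Int
  | fc, 0 => some fc
  | fc, fuel + 1 =>
    if fc = 0 then none
    else if res.contains (pvSuff key fc) then pvAWhile res key (fc + 1) fuel
    else some fc

/-- One iteration of A's `for key in names` loop over the state `(res, ans)`. -/
def pvAStep (st : PySem.Dict String Int × List String) (key : String) :
    PySem.Dict String Int × List String :=
  if st.1.contains key = false then
    (st.1.insert key 1, st.2 ++ [key])
  else
    match pvAWhile st.1 key (st.1.getD key 0) (st.1.items.length + 1) with
    | none => (st.1.insert key 0, st.2)        -- loop exited via `while fileCount:`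
    | some fc =>
      ((st.1.insert (pvSuff key fc) 1).insert key (fc + 1), st.2 ++ [pvSuff key fc])

def getFolderNames (names : List String) : List String :=
  (names.foldl pvAStep (PySem.Dict.empty, [])).2

-- ===== PORT B =====
-- B keeps only `taken`, the set of already-produced names.

/-- B's `while name + "(" + str(k) + ")" in taken: k += 1`, rescanning from 1;
    fuel for structural recursion as above. -/
def pvBWhile (taken : PySem.Set String) (name : String) : Int → Nat → Int
  | k, 0 => k
  | k, fuel + 1 =>
    if PySem.Set.contains taken (name ++ "(" ++ PySem.Int.toStr k ++ ")") then
      pvBWhile taken name (k + 1) fuel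
    else k

/-- One iteration of B's `for name in names` loop over the state `(taken, ans)`. -/
def pvBStep (st : PySem.Set String × List String) (name : String) :
    PySem.Set String × List String :=
  if PySem.Set.contains st.1 name then
    let k := pvBWhile st.1 name 1 (st.1.length + 1)
    let nm := name ++ "(" ++ PySem.Int.toStr k ++ ")"
    (PySem.Set.add st.1 nm, st.2 ++ [nm])
  else
    (PySem.Set.add st.1 name, st.2 ++ [name])

def getFolderNames_alt (names : List String) : List String :=
  (names.foldl pvBStep (PySem.Set.empty, [])).2

-- ===== PRECONDITION & SPEC =====
def Spec_getFolderNames (names : List String) (out : List String) : Prop := out = getFolderNames_alt names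
instance (names : List String) (out : List String) : Decidable (Spec_getFolderNames names out) := by unfold Spec_getFolderNames; infer_instance

-- ===== CLAIM (what is proved, stated in full; the proofs are below) =====
def Claim_equal_getFolderNames : Prop := ∀ (names : List String), Dom_getFolderNames names → Spec_getFolderNames names (getFolderNames names)

-- ===== LEMMAS AND PROOFS =====

/-- Decimal digit characters of `n`, most significant first (structural model of
    core's fuelled `Nat.toDigitsCore`). -/
def pvDigs (n : Nat) : List Char :=
  if _h : n < 10 then [Nat.digitChar n]
  else pvDigs (n / 10) ++ [Nat.digitChar (n % 10)]
  decreasing_by exact Nat.div_lt_self (by omega) (by omega)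

lemma pvDigs_lt {n : Nat} (h : n < 10) : pvDigs n = [Nat.digitChar n] := by
  rw [pvDigs]; simp [h]

lemma pvDigs_ge {n : Nat} (h : ¬ n < 10) :
    pvDigs n = pvDigs (n / 10) ++ [Nat.digitChar (n % 10)] := by
  rw [pvDigs]; simp [h]

lemma pvDigs_toDigitsCore :
    ∀ (f n : Nat) (ds : List Char), n < f →
      Nat.toDigitsCore 10 f n ds = pvDigs n ++ ds := by
  intro f
  induction f with
  | zero => intro n ds h; omega
  | succ f ih =>
    intro n ds h
    rw [Nat.toDigitsCore]
    by_cases h10 : n < 10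
    · have : n / 10 = 0 := Nat.div_eq_of_lt h10
      simp [this, pvDigs, h10, Nat.mod_eq_of_lt h10]
    · have hne : n / 10 ≠ 0 := by omega
      have hlt : n / 10 < f := by omega
      simp only [if_neg hne]
      rw [ih (n / 10) _ hlt, pvDigs_ge h10, List.append_assoc]
      rfl

lemma toDigits_eq_pvDigs (n : Nat) : Nat.toDigits 10 n = pvDigs n := by
  have := pvDigs_toDigitsCore (n + 1) n [] (by omega)
  simpa [Nat.toDigits] using this

lemma digitChar_inj_lt : ∀ a < 10, ∀ b < 10, Nat.digitChar a = Nat.digitChar b → a = b := by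
  decide

lemma pvDigs_ne_nil (n : Nat) : pvDigs n ≠ [] := by
  rw [pvDigs]; split <;> simp

lemma pvDigs_inj : ∀ (m n : Nat), pvDigs m = pvDigs n → m = n := by
  intro m
  induction m using Nat.strong_induction_on with
  | _ m ih =>
    intro n h
    by_cases hm : m < 10 <;> by_cases hn : n < 10
    · rw [pvDigs_lt hm, pvDigs_lt hn] at h
      simp at h
      exact digitChar_inj_lt m hm n hn h
    · rw [pvDigs_lt hm, pvDigs_ge hn] at h
      have hl := congrArg List.length h
      rw [List.length_append] at hl
      simp only [List.length_cons, List.length_nil] at hl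
      have h0 : (pvDigs (n / 10)).length = 0 := by omega
      exact absurd (List.length_eq_zero_iff.mp h0) (pvDigs_ne_nil _)
    · rw [pvDigs_ge hm, pvDigs_lt hn] at h
      have hl := congrArg List.length h
      rw [List.length_append] at hl
      simp only [List.length_cons, List.length_nil] at hl
      have h0 : (pvDigs (m / 10)).length = 0 := by omega
      exact absurd (List.length_eq_zero_iff.mp h0) (pvDigs_ne_nil _)
    · rw [pvDigs_ge hm, pvDigs_ge hn] at h
      obtain ⟨h1, h2⟩ := List.append_inj' h rfl
      have hdiv : m / 10 = n / 10 :=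
        ih (m / 10) (Nat.div_lt_self (by omega) (by omega)) _ h1
      have h2' : (m % 10).digitChar = (n % 10).digitChar := by simpa using h2
      have hmod : m % 10 = n % 10 :=
        digitChar_inj_lt _ (Nat.mod_lt _ (by omega)) _ (Nat.mod_lt _ (by omega)) h2'
      omega

lemma toChars_inj_pos {a b : Int} (ha : 1 ≤ a) (hb : 1 ≤ b)
    (h : PySem.Int.toChars a = PySem.Int.toChars b) : a = b := by
  unfold PySem.Int.toChars at h
  rw [if_neg (by omega), if_neg (by omega)] at h
  rw [toDigits_eq_pvDigs, toDigits_eq_pvDigs] at h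
  have := pvDigs_inj _ _ h
  omega

lemma pvSuff_inj {key : String} {a b : Int} (ha : 1 ≤ a) (hb : 1 ≤ b)
    (h : pvSuff key a = pvSuff key b) : a = b := by
  unfold pvSuff at h
  have h' := congrArg String.toList h
  simp only [String.toList_append, PySem.Int.toList_toStr] at h'
  have hch : PySem.Int.toChars a = PySem.Int.toChars b := by
    simp only [List.append_assoc] at h'
    have h1 := List.append_cancel_left h'
    have h2 := List.append_cancel_left h1
    exact List.append_cancel_right h2
  exact toChars_inj_pos ha hb hch

-- scan lemmas, generic in the list `T` of taken names

/-- Some probe among `k, k+1, …, k+fuel-1` is free. -/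
def pvFound (T : List String) (key : String) (k : Int) (fuel : Nat) : Prop :=
  ∃ j : Nat, j < fuel ∧ pvSuff key (k + j) ∉ T

lemma pvBWhile_succ (T : List String) (key : String) (k : Int) (fuel : Nat) :
    pvBWhile T key k (fuel + 1) =
      if pvSuff key k ∈ T then pvBWhile T key (k + 1) fuel else k := by
  rw [pvBWhile, pvSuff]
  simp [PySem.Set.contains]

lemma pvFound_step {T : List String} {key : String} {k : Int} {fuel : Nat}
    (hf : pvFound T key k (fuel + 1)) (hmem : pvSuff key k ∈ T) :
    pvFound T key (k + 1) fuel := by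
  obtain ⟨j, hj, hfree⟩ := hf
  cases j with
  | zero => simp at hfree; exact absurd hmem hfree
  | succ j =>
    exact ⟨j, by omega, by
      have : k + 1 + (j : Int) = k + ((j : Int) + 1) := by omega
      rw [this]; exact_mod_cast hfree⟩

lemma pvBWhile_congr :
    ∀ (f1 : Nat) {f2 : Nat} {T : List String} {key : String} {k : Int},
      pvFound T key k f1 → pvFound T key k f2 →
      pvBWhile T key k f1 = pvBWhile T key k f2 := by
  intro f1
  induction f1 with
  | zero => intro f2 T key k h1 _; obtain ⟨j, hj, _⟩ := h1; omega
  | succ f1 ih =>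
    intro f2 T key k h1 h2
    cases f2 with
    | zero => obtain ⟨j, hj, _⟩ := h2; omega
    | succ f2 =>
      rw [pvBWhile_succ, pvBWhile_succ]
      by_cases hmem : pvSuff key k ∈ T
      · rw [if_pos hmem, if_pos hmem]
        exact ih (pvFound_step h1 hmem) (pvFound_step h2 hmem)
      · rw [if_neg hmem, if_neg hmem]

lemma pvBWhile_shift :
    ∀ (f1 : Nat) {f2 : Nat} {T : List String} {key : String} {k c : Int},
      k ≤ c → (∀ j : Int, 1 ≤ j → j < c → pvSuff key j ∈ T) → 1 ≤ k →
      pvFound T key k f1 → pvFound T key c f2 →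
      pvBWhile T key k f1 = pvBWhile T key c f2 := by
  intro f1
  induction f1 with
  | zero => intro f2 T key k c _ _ _ h1 _; obtain ⟨j, hj, _⟩ := h1; omega
  | succ f1 ih =>
    intro f2 T key k c hkc hpre hk1 h1 h2
    rcases eq_or_lt_of_le hkc with heq | hlt
    · subst heq; exact pvBWhile_congr _ h1 h2
    · have hmem : pvSuff key k ∈ T := hpre k hk1 hlt
      rw [pvBWhile_succ, if_pos hmem]
      exact ih (by omega) hpre (by omega) (pvFound_step h1 hmem) h2

lemma pvFound_len (T : List String) (key : String) (k : Int) (hk : 1 ≤ k) :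
    pvFound T key k (T.length + 1) := by
  by_contra hc
  unfold pvFound at hc
  push Not at hc
  have hinj : Function.Injective (fun j : Nat => pvSuff key (k + (j : Int))) := by
    intro j1 j2 hj
    have h12 : k + (j1 : Int) = k + (j2 : Int) :=
      pvSuff_inj (key := key) (by omega) (by omega) hj
    omega
  set L : List String :=
    (List.range (T.length + 1)).map (fun j : Nat => pvSuff key (k + (j : Int))) with hL
  have hnd : L.Nodup := (List.nodup_range).map hinj
  have hsub : L ⊆ T := by
    intro x hx
    rw [hL, List.mem_map] at hx
    obtain ⟨j, hj, rfl⟩ := hx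
    exact hc j (List.mem_range.mp hj)
  have h1 : L.toFinset.card = L.length := List.toFinset_card_of_nodup hnd
  have h2 : L.toFinset ⊆ T.toFinset := by
    intro x hx; simp only [List.mem_toFinset] at hx ⊢; exact hsub hx
  have h3 := Finset.card_le_card h2
  have h4 := List.toFinset_card_le T
  have h5 : L.length = T.length + 1 := by simp [hL]
  omega

lemma pvBWhile_spec :
    ∀ (fuel : Nat) {T : List String} {key : String} {k : Int},
      pvFound T key k fuel →
      k ≤ pvBWhile T key k fuel ∧ pvSuff key (pvBWhile T key k fuel) ∉ T ∧
        ∀ j : Int, k ≤ j → j < pvBWhile T key k fuel → pvSuff key j ∈ T := by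
  intro fuel
  induction fuel with
  | zero => intro T key k h; obtain ⟨j, hj, _⟩ := h; omega
  | succ fuel ih =>
    intro T key k h
    rw [pvBWhile_succ]
    by_cases hmem : pvSuff key k ∈ T
    · rw [if_pos hmem]
      obtain ⟨hle, hfree, hall⟩ := ih (pvFound_step h hmem)
      refine ⟨by omega, hfree, ?_⟩
      intro j hj1 hj2
      rcases eq_or_lt_of_le hj1 with heq | hlt
      · subst heq; exact hmem
      · exact hall j (by omega) hj2
    · rw [if_neg hmem]
      exact ⟨le_refl _, hmem, by intro j h1 h2; omega⟩

lemma pvAWhile_eq_pvBWhile (res : PySem.Dict String Int) (key : String) :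
    ∀ (fuel : Nat) (fc : Int), 1 ≤ fc →
      pvAWhile res key fc fuel = some (pvBWhile res.keys key fc fuel) := by
  intro fuel
  induction fuel with
  | zero => intro fc _; rfl
  | succ fuel ih =>
    intro fc hfc
    rw [pvAWhile, pvBWhile_succ, if_neg (by omega : ¬ fc = 0)]
    rw [PySem.Dict.contains_eq_decide_mem_keys]
    by_cases hmem : pvSuff key fc ∈ res.keys
    · simp only [hmem, decide_true, if_true]
      exact ih (fc + 1) (by omega)
    · simp [hmem]

/-- Invariant on A's dictionary: every stored counter `c` is at least 1 and all
    suffixed names below `c` are already taken. -/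
def pvInv (res : PySem.Dict String Int) : Prop :=
  ∀ s ∈ res.keys, 1 ≤ res.getD s 0 ∧
    ∀ j : Int, 1 ≤ j → j < res.getD s 0 → pvSuff s j ∈ res.keys

lemma pvSetContains_eq (T : List String) (s : String) :
    PySem.Set.contains T s = decide (s ∈ T) := by
  simp [PySem.Set.contains]

lemma pvInv_insert (res : PySem.Dict String Int) (x : String) (v : Int)
    (hv : 1 ≤ v) (hall : ∀ j : Int, 1 ≤ j → j < v → pvSuff x j ∈ res.keys)
    (hinv : pvInv res) : pvInv (res.insert x v) := by
  intro s' hs'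
  rw [PySem.Dict.getD_insert]
  by_cases he : s' = x
  · rw [if_pos he]
    refine ⟨hv, ?_⟩
    intro j hj1 hj2
    subst he
    exact (PySem.Dict.mem_keys_insert _ _ _ _).mpr (Or.inr (hall j hj1 hj2))
  · rw [if_neg he]
    have hs'' : s' ∈ res.keys := by
      rcases (PySem.Dict.mem_keys_insert _ _ _ _).mp hs' with h | h
      · exact absurd h he
      · exact h
    obtain ⟨h1, h2⟩ := hinv s' hs''
    exact ⟨h1, fun j hj1 hj2 => (PySem.Dict.mem_keys_insert _ _ _ _).mpr (Or.inr (h2 j hj1 hj2))⟩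

lemma pvMain :
    ∀ (names : List String) (res : PySem.Dict String Int) (ans : List String),
      pvInv res →
      (names.foldl pvAStep (res, ans)).2 = (names.foldl pvBStep (res.keys, ans)).2 := by
  intro names
  induction names with
  | nil => intro res ans _; rfl
  | cons key rest ih =>
    intro res ans hinv
    simp only [List.foldl_cons]
    by_cases hc : key ∈ res.keys
    · -- collision branch
      have hcontains : res.contains key = true := by
        rw [PySem.Dict.contains_eq_decide_mem_keys]; simpa
      obtain ⟨hc1, hpre⟩ := hinv key hc
      set c := res.getD key 0 with hcdef
      set T := res.keys with hT
      have hfoundc : pvFound T key c (T.length + 1) := pvFound_len T key c hc1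
      have hfound1 : pvFound T key 1 (T.length + 1) := pvFound_len T key 1 (by omega)
      set k0 := pvBWhile T key c (T.length + 1) with hk0
      obtain ⟨hck0, hfree, hall⟩ := pvBWhile_spec _ hfoundc
      have hkeyslen : res.keys.length = res.items.length := by
        simp [PySem.Dict.keys]
      have hA : pvAStep (res, ans) key =
          ((res.insert (pvSuff key k0) 1).insert key (k0 + 1), ans ++ [pvSuff key k0]) := by
        rw [pvAStep]
        simp only [hcontains]
        rw [if_neg (by simp)]
        have : pvAWhile res key (res.getD key 0) (res.items.length + 1) = some k0 := by
          rw [pvAWhile_eq_pvBWhile res key _ _ (by rw [← hcdef]; omega), ← hcdef]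
          congr 1
          rw [hk0]
          exact pvBWhile_congr _
            (by rw [← hT, ← hkeyslen]; exact pvFound_len T key c hc1) hfoundc
        rw [this]
      have hB : pvBStep (res.keys, ans) key =
          (res.keys ++ [pvSuff key k0], ans ++ [pvSuff key k0]) := by
        rw [pvBStep]
        rw [pvSetContains_eq]
        simp only [← hT, hc, decide_true, if_true]
        have hbk : pvBWhile T key 1 (T.length + 1) = k0 := by
          rw [hk0]
          exact pvBWhile_shift _ hc1 hpre (by omega) hfound1 hfoundc
        have hnm : (key ++ "(" ++ PySem.Int.toStr (pvBWhile T key 1 (T.length + 1)) ++ ")") =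
            pvSuff key k0 := by rw [hbk]; rfl
        simp only [hnm, PySem.Set.add, pvSetContains_eq]
        rw [if_neg (by simpa using hfree)]
      rw [hA, hB]
      have hfree' : res.contains (pvSuff key k0) = false := by
        rw [PySem.Dict.contains_eq_decide_mem_keys]; simpa using hfree
      have hkeys1 : (res.insert (pvSuff key k0) 1).keys = res.keys ++ [pvSuff key k0] :=
        PySem.Dict.keys_insert_of_not_contains res 1 hfree'
      have hcont2 : (res.insert (pvSuff key k0) 1).contains key = true := by
        rw [PySem.Dict.contains_eq_decide_mem_keys, hkeys1]
        simp only [List.mem_append, decide_eq_true_eq]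
        exact Or.inl hc
      have hkeys2 : ((res.insert (pvSuff key k0) 1).insert key (k0 + 1)).keys =
          res.keys ++ [pvSuff key k0] := by
        rw [PySem.Dict.keys_insert_of_contains _ (k0 + 1) hcont2, hkeys1]
      have hinv1 : pvInv (res.insert (pvSuff key k0) 1) :=
        pvInv_insert res _ 1 (by omega) (by intro j h1 h2; omega) hinv
      have hinv2 : pvInv ((res.insert (pvSuff key k0) 1).insert key (k0 + 1)) := by
        refine pvInv_insert _ _ _ (by omega) ?_ hinv1
        intro j hj1 hj2
        rw [hkeys1, List.mem_append]
        rcases lt_or_ge j c with hjc | hjc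
        · exact Or.inl (hpre j hj1 hjc)
        · rcases lt_or_ge j k0 with hjk | hjk
          · exact Or.inl (hall j hjc hjk)
          · have : j = k0 := by omega
            subst this
            simp
      rw [← hkeys2]
      exact ih _ _ hinv2
    · -- fresh-name branch
      have hcf : res.contains key = false := by
        rw [PySem.Dict.contains_eq_decide_mem_keys]; simpa using hc
      have hA : pvAStep (res, ans) key = (res.insert key 1, ans ++ [key]) := by
        rw [pvAStep]; simp [hcf]
      have hB : pvBStep (res.keys, ans) key = (res.keys ++ [key], ans ++ [key]) := by
        rw [pvBStep, pvSetContains_eq]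
        simp only [hc, decide_false, Bool.false_eq_true, if_false]
        simp [PySem.Set.add, hc]
      rw [hA, hB, ← PySem.Dict.keys_insert_of_not_contains res 1 hcf]
      exact ih _ _ (pvInv_insert res key 1 (by omega) (by intro j h1 h2; omega) hinv)

-- ===== VERDICT (by name: the statement is the Claim_ definition above) =====
theorem getFolderNames_spec : Claim_equal_getFolderNames := by
  intro names _
  unfold Spec_getFolderNames getFolderNames getFolderNames_alt
  have h : (PySem.Dict.empty : PySem.Dict String Int).keys = (PySem.Set.empty : PySem.Set String) := rfl
  rw [← h]
  exact pvMain names PySem.Dict.empty [] (by intro s hs; simp [PySem.Dict.keys_empty] at hs)
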